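-- pv_equiv track=rewrite | github.com/NishantKumar1301/Dsa-Pratice-Questions | Leetcode/Problem Of The Day/May 2025/may20.py | isZeroArray
-- ===== SOURCE A (Python) =====
-- def isZeroArray(nums, queries):
--     """
--     :type nums: List[int]
--     :type queries: List[List[int]]
--     :rtype: bool
--     """
--     n = len(nums)
--     arr = [0]*n
--     for query in queries:
--         arr[query[0]]+=1
--         if query[1]+1 <n:
--             arr[query[1]+1 ]-=1
--     for i in range(1,n):
--         arr[i]=arr[i]+arr[i-1]
--     for i in range(n):
--         if arr[i]<nums[i]:
--             return False
--     return True
-- ===== SOURCE B (Python) =====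
-- def isZeroArray(nums, queries):
--     n = len(nums)
--     starts = [0] * n
--     stops = [0] * n
--     for q in queries:
--         starts[q[0]] += 1
--         if q[1] + 1 < n:
--             stops[q[1] + 1] += 1
--     return all(sum(starts[: i + 1]) - sum(stops[: i + 1]) >= nums[i] for i in range(n))
-- ===== Notes on version B (the rewrite author's own statement) =====
-- stated objective: alternative
-- what changed: B keeps no signed difference array and no in-place prefix-sum pass: it tallies query starts and stops into two separate count lists and re-derives each index's coverage by a slice-sum rescan inside a single all(...), instead of A's difference array mutated into a prefix table and scanned with early return.
import Mathlib
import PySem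

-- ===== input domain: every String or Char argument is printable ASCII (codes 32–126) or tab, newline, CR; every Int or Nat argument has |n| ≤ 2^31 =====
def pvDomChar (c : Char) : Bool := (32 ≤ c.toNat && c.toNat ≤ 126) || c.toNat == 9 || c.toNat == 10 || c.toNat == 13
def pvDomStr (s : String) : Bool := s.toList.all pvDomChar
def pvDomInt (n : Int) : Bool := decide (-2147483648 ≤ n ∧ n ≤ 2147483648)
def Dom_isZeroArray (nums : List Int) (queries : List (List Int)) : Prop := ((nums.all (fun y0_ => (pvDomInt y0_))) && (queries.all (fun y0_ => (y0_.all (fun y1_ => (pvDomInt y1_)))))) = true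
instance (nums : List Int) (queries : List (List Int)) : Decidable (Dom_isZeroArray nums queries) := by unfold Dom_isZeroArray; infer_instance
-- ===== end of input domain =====

-- B drops A's signed difference array and its in-place prefix-sum pass: it tallies query
-- starts and stops into two separate count lists and re-derives each index's coverage by a
-- slice-sum rescan inside a single all(...) (alternative decomposition, not claimed faster).

-- ===== PORT A =====
-- one iteration of A's first loop: arr[q[0]] += 1; if q[1]+1 < n: arr[q[1]+1] -= 1
def pvA_apply (n : Int) (arr : List Int) (q : List Int) : List Int :=
  let q0 := PySem.List.pyGetD q 0 0
  let a1 := PySem.List.pySetD arr q0 (PySem.List.pyGetD arr q0 0 + 1)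
  let q1 := PySem.List.pyGetD q 1 0
  if q1 + 1 < n then PySem.List.pySetD a1 (q1 + 1) (PySem.List.pyGetD a1 (q1 + 1) 0 - 1) else a1

def isZeroArray (nums : List Int) (queries : List (List Int)) : Bool :=
  let n : Int := PySem.List.len nums
  let arr0 : List Int := List.replicate nums.length 0
  let arr1 : List Int := queries.foldl (pvA_apply n) arr0
  let arr2 : List Int := (PySem.List.pyRange 1 n 1).foldl
    (fun a i => PySem.List.pySetD a i (PySem.List.pyGetD a i 0 + PySem.List.pyGetD a (i - 1) 0)) arr1
  (PySem.List.pyRange 0 n 1).all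
    (fun i => !(PySem.List.pyGetD arr2 i 0 < PySem.List.pyGetD nums i 0))

-- ===== PORT B =====
-- one iteration of B's loop: starts[q[0]] += 1; if q[1]+1 < n: stops[q[1]+1] += 1
def pvB_apply (n : Int) (st : List Int × List Int) (q : List Int) : List Int × List Int :=
  let starts := PySem.List.pySetD st.1 (PySem.List.pyGetD q 0 0)
    (PySem.List.pyGetD st.1 (PySem.List.pyGetD q 0 0) 0 + 1)
  let stops := if PySem.List.pyGetD q 1 0 + 1 < n then
      PySem.List.pySetD st.2 (PySem.List.pyGetD q 1 0 + 1)
        (PySem.List.pyGetD st.2 (PySem.List.pyGetD q 1 0 + 1) 0 + 1)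
    else st.2
  (starts, stops)

def isZeroArray_alt (nums : List Int) (queries : List (List Int)) : Bool :=
  let n : Int := PySem.List.len nums
  let st : List Int × List Int := queries.foldl (pvB_apply n)
    (List.replicate nums.length 0, List.replicate nums.length 0)
  (PySem.List.pyRange 0 n 1).all (fun i =>
    decide ((PySem.List.slice st.1 none (some (i + 1))).sum
      - (PySem.List.slice st.2 none (some (i + 1))).sum ≥ PySem.List.pyGetD nums i 0))

-- ===== PRECONDITION & SPEC =====
-- Pre_ is exactly the closed form of "A returns normally": every query has ≥ 2 entries,
-- q[0] is a valid (possibly negative, Python-style) index into nums, and when the guard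
-- q[1]+1 < n fires, q[1]+1 is also a valid index; outside Pre_ A (and B) raise IndexError.
def Pre_isZeroArray (nums : List Int) (queries : List (List Int)) : Prop :=
  ∀ q ∈ queries, 2 ≤ q.length ∧ -(nums.length : Int) ≤ q.getD 0 0 ∧ q.getD 0 0 < (nums.length : Int) ∧
    (q.getD 1 0 + 1 < (nums.length : Int) → -(nums.length : Int) ≤ q.getD 1 0 + 1)
instance (nums : List Int) (queries : List (List Int)) : Decidable (Pre_isZeroArray nums queries) := by unfold Pre_isZeroArray; infer_instance

def pvWitness_isZeroArray : List Int × List (List Int) := ([1, 0], [[0, 1]])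

def Spec_isZeroArray (nums : List Int) (queries : List (List Int)) (out : Bool) : Prop := out = isZeroArray_alt nums queries
instance (nums : List Int) (queries : List (List Int)) (out : Bool) : Decidable (Spec_isZeroArray nums queries out) := by unfold Spec_isZeroArray; infer_instance

-- ===== CLAIM (what is proved, stated in full; the proofs are below) =====
def Claim_equal_isZeroArray : Prop := ∀ (nums : List Int) (queries : List (List Int)), Dom_isZeroArray nums queries → Pre_isZeroArray nums queries → Spec_isZeroArray nums queries (isZeroArray nums queries)

-- ===== LEMMAS AND PROOFS =====

-- Python's index resolution for a list of length `len` (valid i, possibly negative)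
def pvRIdx (len : Nat) (i : Int) : Nat := (if i < 0 then i + len else i).toNat

lemma pv_rIdx_lt (len : Nat) (i : Int) (h1 : -(len : Int) ≤ i) (h2 : i < len) : pvRIdx len i < len := by
  unfold pvRIdx; split <;> omega

lemma pv_pySetD_res (arr : List Int) (i : Int) (h1 : -(arr.length : Int) ≤ i) (h2 : i < arr.length) (v : Int) :
    PySem.List.pySetD arr i v = arr.set (pvRIdx arr.length i) v := by
  rcases Int.lt_or_le i 0 with h | h
  · unfold pvRIdx
    rw [if_pos h]
    simp only [PySem.List.pySetD, PySem.List.pySet?, PySem.List.pyIdx?]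
    rw [if_neg (by omega), if_pos (by omega)]
    simp only [Option.map_some, Option.getD_some]
    congr 1
    omega
  · have e : pvRIdx arr.length i = i.toNat := by unfold pvRIdx; rw [if_neg (by omega)]
    rw [e]
    conv_lhs => rw [show i = ((i.toNat : Nat) : Int) from (Int.toNat_of_nonneg h).symm]
    rw [PySem.List.pySetD_natCast]

lemma pv_pyGetD_res (arr : List Int) (i : Int) (h1 : -(arr.length : Int) ≤ i) (h2 : i < arr.length) (d : Int) :
    PySem.List.pyGetD arr i d = arr.getD (pvRIdx arr.length i) d := by
  rcases Int.lt_or_le i 0 with h | h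
  · have e : pvRIdx arr.length i = arr.length - (-i).toNat := by
      unfold pvRIdx; rw [if_pos h]; omega
    rw [e]
    have hk : i = -(((-i).toNat : Nat) : Int) := by omega
    rw [hk, PySem.List.pyGetD_neg_natCast _ _ _ (by omega) (by omega)]
    rw [List.getD_eq_getElem?_getD, List.getElem?_eq_getElem (by omega)]
    simp [show max (-i) 0 = -i from max_eq_left (by omega)]
  · have e : pvRIdx arr.length i = i.toNat := by unfold pvRIdx; rw [if_neg (by omega)]
    rw [e]
    conv_lhs => rw [show i = ((i.toNat : Nat) : Int) from (Int.toNat_of_nonneg h).symm]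
    rw [PySem.List.pyGetD_natCast]

lemma pv_incr_getD (arr : List Int) (j : Nat) (hj : j < arr.length) (d : Int) (m : Nat) :
    (arr.set j (arr.getD j 0 + d)).getD m 0 = arr.getD m 0 + (if m = j then d else 0) := by
  rcases Nat.lt_or_ge m arr.length with hm | hm
  · by_cases h : m = j
    · subst h; simp [List.getD, hm]
    · simp [List.getD, Ne.symm h, h]
  · have h1 : m ≠ j := by omega
    rw [List.getD, List.getElem?_set, if_neg (by omega : ¬ j = m)]
    simp [List.getD, List.getElem?_eq_none_iff.2 (by simpa using hm), h1]

lemma pv_set_getD (l : List Int) (k : Nat) (hk : k < l.length) (v : Int) (m : Nat) :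
    (l.set k v).getD m 0 = if m = k then v else l.getD m 0 := by
  rcases Nat.lt_or_ge m l.length with hm | hm
  · by_cases h : m = k
    · subst h; simp [List.getD, hm]
    · simp [List.getD, Ne.symm h, h]
  · rw [List.getD, List.getElem?_set, if_neg (by omega : ¬ k = m), if_neg (by omega : ¬ m = k)]
    rfl

lemma pv_len_apply (n : Int) (arr : List Int) (q : List Int) :
    (pvA_apply n arr q).length = arr.length := by
  dsimp only [pvA_apply]
  split <;> simp [PySem.List.length_pySetD]

lemma pv_len_applyB1 (n : Int) (st : List Int × List Int) (q : List Int) :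
    (pvB_apply n st q).1.length = st.1.length := by
  dsimp only [pvB_apply]
  simp [PySem.List.length_pySetD]

lemma pv_len_applyB2 (n : Int) (st : List Int × List Int) (q : List Int) :
    (pvB_apply n st q).2.length = st.2.length := by
  dsimp only [pvB_apply]
  split <;> simp [PySem.List.length_pySetD]

-- one query step: A's signed difference cell is B's starts-count minus stops-count, pointwise
lemma pv_step (n : Nat) (arr s t : List Int) (hA : arr.length = n) (hs : s.length = n) (ht : t.length = n)
    (q : List Int)
    (hq : 2 ≤ q.length ∧ -(n : Int) ≤ q.getD 0 0 ∧ q.getD 0 0 < (n : Int) ∧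
      (q.getD 1 0 + 1 < (n : Int) → -(n : Int) ≤ q.getD 1 0 + 1))
    (h : ∀ j : Nat, arr.getD j 0 = s.getD j 0 - t.getD j 0) (j : Nat) :
    (pvA_apply (n : Int) arr q).getD j 0
      = (pvB_apply (n : Int) (s, t) q).1.getD j 0 - (pvB_apply (n : Int) (s, t) q).2.getD j 0 := by
  obtain ⟨hlq, hq0a, hq0b, hq1⟩ := hq
  have e0 : PySem.List.pyGetD q 0 0 = q.getD 0 0 := PySem.List.pyGetD_zero q 0
  have e1 : PySem.List.pyGetD q 1 0 = q.getD 1 0 := PySem.List.pyGetD_ofNat' q 1 0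
  set q0 := q.getD 0 0 with hq0def
  set q1 := q.getD 1 0 with hq1def
  set j0 : Nat := pvRIdx n q0 with hj0
  have hj0n : j0 < n := pv_rIdx_lt n q0 hq0a hq0b
  have hA1 : PySem.List.pySetD arr (PySem.List.pyGetD q 0 0) (PySem.List.pyGetD arr (PySem.List.pyGetD q 0 0) 0 + 1)
      = arr.set j0 (arr.getD j0 0 + 1) := by
    rw [e0, pv_pySetD_res arr q0 (by omega) (by omega), pv_pyGetD_res arr q0 (by omega) (by omega), hA]
  have hB1 : PySem.List.pySetD s (PySem.List.pyGetD q 0 0) (PySem.List.pyGetD s (PySem.List.pyGetD q 0 0) 0 + 1)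
      = s.set j0 (s.getD j0 0 + 1) := by
    rw [e0, pv_pySetD_res s q0 (by omega) (by omega), pv_pyGetD_res s q0 (by omega) (by omega), hs]
  dsimp only [pvA_apply, pvB_apply]
  rw [hA1, hB1, e1]
  by_cases hb : q1 + 1 < (n : Int)
  · set j1 : Nat := pvRIdx n (q1 + 1) with hj1
    have hj1n : j1 < n := pv_rIdx_lt n (q1 + 1) (hq1 hb) hb
    have hlen1 : (arr.set j0 (arr.getD j0 0 + 1)).length = n := by simp [hA]
    have hA2 : PySem.List.pySetD (arr.set j0 (arr.getD j0 0 + 1)) (q1 + 1)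
        (PySem.List.pyGetD (arr.set j0 (arr.getD j0 0 + 1)) (q1 + 1) 0 - 1)
        = (arr.set j0 (arr.getD j0 0 + 1)).set j1 ((arr.set j0 (arr.getD j0 0 + 1)).getD j1 0 + (-1)) := by
      rw [pv_pySetD_res _ (q1+1) (by omega) (by omega),
        pv_pyGetD_res _ (q1+1) (by omega) (by omega), hlen1]
      rw [sub_eq_add_neg]
    have hB2 : PySem.List.pySetD t (q1 + 1) (PySem.List.pyGetD t (q1 + 1) 0 + 1)
        = t.set j1 (t.getD j1 0 + 1) := by
      rw [pv_pySetD_res t (q1+1) (by omega) (by omega), pv_pyGetD_res t (q1+1) (by omega) (by omega), ht]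
    rw [if_pos hb, if_pos hb, hA2, hB2]
    rw [pv_incr_getD _ j1 (by omega) (-1) j, pv_incr_getD arr j0 (by omega) 1 j,
      pv_incr_getD s j0 (by omega) 1 j, pv_incr_getD t j1 (by omega) 1 j]
    have := h j
    split_ifs <;> omega
  · rw [if_neg hb, if_neg hb]
    rw [pv_incr_getD arr j0 (by omega) 1 j, pv_incr_getD s j0 (by omega) 1 j]
    have := h j
    split_ifs <;> omega

lemma pv_len_fold (n : Int) (qs : List (List Int)) :
    ∀ arr : List Int, (qs.foldl (pvA_apply n) arr).length = arr.length := by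
  induction qs with
  | nil => intro arr; rfl
  | cons q qs ih => intro arr; rw [List.foldl_cons, ih, pv_len_apply]

-- the whole first pass: A's difference array is B's starts minus B's stops, pointwise
lemma pv_pointwise (n : Nat) (qs : List (List Int))
    (hqs : ∀ q ∈ qs, 2 ≤ q.length ∧ -(n : Int) ≤ q.getD 0 0 ∧ q.getD 0 0 < (n : Int) ∧
      (q.getD 1 0 + 1 < (n : Int) → -(n : Int) ≤ q.getD 1 0 + 1)) :
    ∀ (arr s t : List Int), arr.length = n → s.length = n → t.length = n →
      (∀ j : Nat, arr.getD j 0 = s.getD j 0 - t.getD j 0) →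
      ∀ j : Nat, (qs.foldl (pvA_apply (n : Int)) arr).getD j 0
        = (qs.foldl (pvB_apply (n : Int)) (s, t)).1.getD j 0
          - (qs.foldl (pvB_apply (n : Int)) (s, t)).2.getD j 0 := by
  induction qs with
  | nil => intro arr s t _ _ _ h j; exact h j
  | cons q qs ih =>
    intro arr s t hA hs ht h j
    rw [List.foldl_cons, List.foldl_cons]
    have hstep := pv_step n arr s t hA hs ht q (hqs q List.mem_cons_self) h
    have hB : pvB_apply (n : Int) (s, t) q
        = ((pvB_apply (n : Int) (s, t) q).1, (pvB_apply (n : Int) (s, t) q).2) := rfl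
    rw [hB]
    exact ih (fun q hq => hqs q (List.mem_cons_of_mem _ hq))
      _ _ _ (by rw [pv_len_apply]; exact hA)
      (by rw [pv_len_applyB1]; exact hs) (by rw [pv_len_applyB2]; exact ht)
      hstep j

-- prefix sum of the first (i+1) entries, read with default 0
def pvPfx (arr : List Int) (i : Nat) : Int := ∑ m ∈ Finset.range (i + 1), arr.getD m 0

lemma pvPfx_sub (a s t : List Int) (h : ∀ j : Nat, a.getD j 0 = s.getD j 0 - t.getD j 0) (m : Nat) :
    pvPfx a m = pvPfx s m - pvPfx t m := by
  unfold pvPfx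
  simp only [h, Finset.sum_sub_distrib]

lemma pv_take_sum (l : List Int) (k : Nat) : (l.take k).sum = ∑ m ∈ Finset.range k, l.getD m 0 := by
  induction k with
  | zero => simp
  | succ k ih =>
    rw [Finset.sum_range_succ, ← ih]
    rcases Nat.lt_or_ge k l.length with hk | hk
    · rw [List.sum_take_succ l k hk]
      simp [List.getD, List.getElem?_eq_getElem hk]
    · rw [List.take_of_length_le (by omega), List.take_of_length_le (by omega)]
      simp [List.getD, List.getElem?_eq_none_iff.2 (by simpa using hk)]

lemma pv_len_loop (rng : List Int) :
    ∀ arr : List Int,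
      (rng.foldl (fun a i => PySem.List.pySetD a i (PySem.List.pyGetD a i 0 + PySem.List.pyGetD a (i - 1) 0)) arr).length
        = arr.length := by
  induction rng with
  | nil => intro arr; rfl
  | cons x xs ihr =>
    intro arr
    rw [List.foldl_cons, ihr, PySem.List.length_pySetD]

lemma pvPrefixLoop (n : Nat) (k : Nat) (hk : k ≤ n) (arr : List Int) (hlen : arr.length = n) :
    ∀ m < n,
      ((PySem.List.pyRange 1 (k : Int) 1).foldl
        (fun a i => PySem.List.pySetD a i (PySem.List.pyGetD a i 0 + PySem.List.pyGetD a (i - 1) 0)) arr).getD m 0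
      = if m < k then pvPfx arr m else arr.getD m 0 := by
  induction k with
  | zero =>
    intro m hm
    rw [PySem.List.pyRange_one_eq_nil (by norm_num)]
    simp
  | succ k ih =>
    intro m hm
    rcases Nat.eq_zero_or_pos k with hk0 | hk1
    · subst hk0
      rw [PySem.List.pyRange_one_eq_nil (by norm_num)]
      simp only [List.foldl_nil]
      by_cases h : m < 1
      · have : m = 0 := by omega
        subst this
        simp [pvPfx]
      · rw [if_neg h]
    · have hkn : k < n := by omega
      have hcast : ((k : Nat) + 1 : Int) = ((k + 1 : Nat) : Int) := by push_cast; ring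
      rw [← hcast, PySem.List.pyRange_one_succ_right (by exact_mod_cast hk1), List.foldl_append,
        List.foldl_cons, List.foldl_nil]
      set prev := (PySem.List.pyRange 1 (k : Int) 1).foldl
        (fun a i => PySem.List.pySetD a i (PySem.List.pyGetD a i 0 + PySem.List.pyGetD a (i - 1) 0)) arr with hprev
      have hplen : prev.length = n := by rw [hprev, pv_len_loop]; exact hlen
      have e1 : PySem.List.pyGetD prev (k : Int) 0 = prev.getD k 0 := PySem.List.pyGetD_natCast ..
      have e2 : PySem.List.pyGetD prev ((k : Int) - 1) 0 = prev.getD (k - 1) 0 := by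
        rw [show ((k : Int) - 1) = ((k - 1 : Nat) : Int) by omega]
        exact PySem.List.pyGetD_natCast ..
      have e3 : PySem.List.pySetD prev (k : Int) (prev.getD k 0 + prev.getD (k-1) 0)
          = prev.set k (prev.getD k 0 + prev.getD (k-1) 0) := PySem.List.pySetD_natCast ..
      rw [e1, e2, e3, pv_set_getD prev k (by omega) _ m]
      have hIH := ih (by omega)
      by_cases h : m = k
      · subst h
        rw [if_pos rfl, if_pos (by omega)]
        rw [hIH m hm, hIH (m-1) (by omega), if_neg (by omega), if_pos (by omega)]
        unfold pvPfx
        rw [show m - 1 + 1 = m by omega, Finset.sum_range_succ]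
        ring
      · rw [if_neg h, hIH m hm]
        by_cases h2 : m < k
        · rw [if_pos h2, if_pos (by omega)]
        · rw [if_neg h2, if_neg (by omega)]

lemma pv_all_congr (l : List Int) (p q : Int → Bool) (h : ∀ x ∈ l, p x = q x) :
    l.all p = l.all q := by
  induction l with
  | nil => rfl
  | cons x xs ih =>
    simp only [List.all_cons]
    rw [h x List.mem_cons_self, ih (fun y hy => h y (List.mem_cons_of_mem _ hy))]

-- ===== VERDICT (by name: the statement is the Claim_ definition above) =====
theorem isZeroArray_spec : Claim_equal_isZeroArray := by
  intro nums queries _ hpre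
  unfold Spec_isZeroArray isZeroArray isZeroArray_alt
  rw [PySem.List.len_eq]
  set n := nums.length with hn
  dsimp only
  apply pv_all_congr
  intro i hi
  rw [PySem.List.mem_pyRange_one] at hi
  obtain ⟨hi0, hin⟩ := hi
  set m : Nat := i.toNat with hm
  have hmi : (m : Int) = i := Int.toNat_of_nonneg hi0
  have hmn : m < n := by omega
  have hlen1 : (queries.foldl (pvA_apply (n : Int)) (List.replicate n 0)).length = n := by
    rw [pv_len_fold]; exact List.length_replicate
  have hpw := pv_pointwise n queries hpre (List.replicate n 0) (List.replicate n 0) (List.replicate n 0)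
    List.length_replicate List.length_replicate List.length_replicate
    (by intro j; simp)
  have hA : PySem.List.pyGetD
      ((PySem.List.pyRange 1 (n : Int) 1).foldl
        (fun a i => PySem.List.pySetD a i (PySem.List.pyGetD a i 0 + PySem.List.pyGetD a (i - 1) 0))
        (queries.foldl (pvA_apply (n : Int)) (List.replicate n 0))) i 0
      = pvPfx (queries.foldl (pvA_apply (n : Int)) (List.replicate n 0)) m := by
    rw [← hmi, PySem.List.pyGetD_natCast,
      pvPrefixLoop n n le_rfl _ hlen1 m hmn, if_pos hmn]
  have hBs : (PySem.List.slice (queries.foldl (pvB_apply (n : Int))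
        (List.replicate n 0, List.replicate n 0)).1 none (some (i + 1))).sum
      = pvPfx (queries.foldl (pvB_apply (n : Int)) (List.replicate n 0, List.replicate n 0)).1 m := by
    rw [show i + 1 = ((m + 1 : Nat) : Int) by omega, PySem.List.slice_to_natCast, pv_take_sum]
    rfl
  have hBt : (PySem.List.slice (queries.foldl (pvB_apply (n : Int))
        (List.replicate n 0, List.replicate n 0)).2 none (some (i + 1))).sum
      = pvPfx (queries.foldl (pvB_apply (n : Int)) (List.replicate n 0, List.replicate n 0)).2 m := by
    rw [show i + 1 = ((m + 1 : Nat) : Int) by omega, PySem.List.slice_to_natCast, pv_take_sum]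
    rfl
  rw [hA, hBs, hBt, pvPfx_sub _ _ _ hpw m]
  set x := pvPfx (queries.foldl (pvB_apply (n : Int)) (List.replicate n 0, List.replicate n 0)).1 m
    - pvPfx (queries.foldl (pvB_apply (n : Int)) (List.replicate n 0, List.replicate n 0)).2 m with hx
  by_cases hc : x < PySem.List.pyGetD nums i 0
  · simp [hc, show ¬ (x ≥ PySem.List.pyGetD nums i 0) by omega]
  · simp [hc, show x ≥ PySem.List.pyGetD nums i 0 by omega]
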